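-- pv_equiv track=rewrite | github.com/bbbradsmith/SNES_stuff | palcycle/art_src/acid.py | palrange
-- ===== SOURCE A (Python) =====
-- P0 = 0 # all 0
--
-- P1 = 1 # all 31
--
-- PU = 2 # 0-31
--
-- PD = 3 # 31-0
--
-- def palrange(vals,step=1): # vals should be RGB triple (P0,P1,PD)
--     p = []
--     for i in range(0,32,step):
--         c = []
--         for v in vals:
--             if v == P0:
--                 c.append(0)
--             elif v == P1:
--                 c.append(31)
--             elif v == PU:
--                 c.append(i)
--             elif v == PD:
--                 c.append(31-i)
--         p.append(tuple(c))
--     return p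
-- ===== SOURCE B (Python) =====
-- P0 = 0
-- P1 = 1
-- PU = 2
-- PD = 3
--
-- def palrange(vals, step=1):
--     rng = list(range(0, 32, step))
--     n = len(rng)
--     cols = []
--     for v in vals:
--         if v == P0:
--             cols.append([0] * n)
--         elif v == P1:
--             cols.append([31] * n)
--         elif v == PU:
--             cols.append(rng)
--         elif v == PD:
--             cols.append([31 - i for i in rng])
--     if not cols:
--         return [() for _ in range(n)]
--     return list(zip(*cols))
-- ===== Notes on version B (the rewrite author's own statement) =====
-- stated objective: alternative
-- what changed: B builds the gradient column-major (one full 0..31 column per recognized channel value) and transposes with zip(*cols), padding with empty tuples when no channel is recognized, instead of A's row-by-row nested loops.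
import Mathlib
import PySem

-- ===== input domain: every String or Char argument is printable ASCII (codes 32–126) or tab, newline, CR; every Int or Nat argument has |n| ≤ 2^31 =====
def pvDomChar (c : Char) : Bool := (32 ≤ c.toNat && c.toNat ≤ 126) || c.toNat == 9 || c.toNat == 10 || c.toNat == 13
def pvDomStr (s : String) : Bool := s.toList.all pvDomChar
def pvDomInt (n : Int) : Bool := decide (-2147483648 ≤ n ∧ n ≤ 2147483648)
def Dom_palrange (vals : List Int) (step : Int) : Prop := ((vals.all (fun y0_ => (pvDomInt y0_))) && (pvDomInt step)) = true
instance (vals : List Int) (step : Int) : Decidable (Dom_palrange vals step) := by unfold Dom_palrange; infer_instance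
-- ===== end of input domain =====

-- B builds the gradient column-major and transposes; A builds it row-by-row with nested loops. Same values, different traversal.

-- ===== PORT A =====
def palrange (vals : List Int) (step : Int) : List (List Int) :=
  (PySem.List.pyRange 0 32 step).foldl (fun p i =>
    p ++ [vals.foldl (fun c v =>
      if v = 0 then c ++ [(0 : Int)]
      else if v = 1 then c ++ [31]
      else if v = 2 then c ++ [i]
      else if v = 3 then c ++ [31 - i]
      else c) []]) []

-- ===== PORT B =====
-- zip(*cols): truncating transpose; the fuel bound (row count) only ensures termination
def pvZipT : Nat → List (List Int) → List (List Int)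
  | 0, _ => []
  | n+1, cols =>
    if cols.any (·.isEmpty) then []
    else (cols.map (·.headI)) :: pvZipT n (cols.map (·.tail))

def palrange_alt (vals : List Int) (step : Int) : List (List Int) :=
  let rng := PySem.List.pyRange 0 32 step
  let n := rng.length
  let cols := vals.foldl (fun cols v =>
    if v = 0 then cols ++ [List.replicate n (0 : Int)]
    else if v = 1 then cols ++ [List.replicate n (31 : Int)]
    else if v = 2 then cols ++ [rng]
    else if v = 3 then cols ++ [rng.map (fun i => 31 - i)]
    else cols) []
  if cols = [] then List.replicate n []
  else pvZipT n cols

-- ===== PRECONDITION & SPEC =====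
-- Pre_ excludes only step = 0, on which Python's range raises ValueError in both A and B.
def Pre_palrange (vals : List Int) (step : Int) : Prop := step ≠ 0
instance (vals : List Int) (step : Int) : Decidable (Pre_palrange vals step) := by unfold Pre_palrange; infer_instance
def pvWitness_palrange : List Int × Int := ([0, 2, 3], 1)
def Spec_palrange (vals : List Int) (step : Int) (out : List (List Int)) : Prop := out = palrange_alt vals step
instance (vals : List Int) (step : Int) (out : List (List Int)) : Decidable (Spec_palrange vals step out) := by unfold Spec_palrange; infer_instance

-- ===== CLAIM (what is proved, stated in full; the proofs are below) =====
def Claim_equal_palrange : Prop := ∀ (vals : List Int) (step : Int), Dom_palrange vals step → Pre_palrange vals step → Spec_palrange vals step (palrange vals step)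

-- ===== LEMMAS AND PROOFS =====

-- the per-cell value for a recognized channel value
def pvG (v i : Int) : Int :=
  if v = 0 then 0 else if v = 1 then 31 else if v = 2 then i else 31 - i

def pvValid (v : Int) : Bool := v == 0 || v == 1 || v == 2 || v == 3

-- A's inner loop is a filtered map over vals
theorem pvA_inner (vals : List Int) (i : Int) (acc : List Int) :
    vals.foldl (fun c v =>
      if v = 0 then c ++ [(0 : Int)]
      else if v = 1 then c ++ [31]
      else if v = 2 then c ++ [i]
      else if v = 3 then c ++ [31 - i]
      else c) acc = acc ++ (vals.filter pvValid).map (fun v => pvG v i) := by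
  induction vals generalizing acc with
  | nil => simp
  | cons v vs ih =>
    by_cases h0 : v = 0 <;> by_cases h1 : v = 1 <;> by_cases h2 : v = 2 <;> by_cases h3 : v = 3 <;>
      simp [ih, pvValid, pvG, h0, h1, h2, h3]

-- A's outer loop maps the row function over the range
theorem pvA_outer (vals : List Int) (rng : List Int) (acc : List (List Int)) :
    rng.foldl (fun p i =>
      p ++ [vals.foldl (fun c v =>
        if v = 0 then c ++ [(0 : Int)]
        else if v = 1 then c ++ [31]
        else if v = 2 then c ++ [i]
        else if v = 3 then c ++ [31 - i]
        else c) []]) acc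
    = acc ++ rng.map (fun i => (vals.filter pvValid).map (fun v => pvG v i)) := by
  induction rng generalizing acc with
  | nil => simp
  | cons i is ih =>
    rw [List.foldl_cons, ih, pvA_inner]
    simp

-- B's column loop: one column per recognized value
theorem pvB_cols (vals : List Int) (rng : List Int) (acc : List (List Int)) :
    vals.foldl (fun cols v =>
      if v = 0 then cols ++ [List.replicate rng.length (0 : Int)]
      else if v = 1 then cols ++ [List.replicate rng.length (31 : Int)]
      else if v = 2 then cols ++ [rng]
      else if v = 3 then cols ++ [rng.map (fun i => 31 - i)]
      else cols) acc
    = acc ++ (vals.filter pvValid).map (fun v => rng.map (fun i => pvG v i)) := by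
  induction vals generalizing acc with
  | nil => simp
  | cons v vs ih =>
    by_cases h0 : v = 0 <;> by_cases h1 : v = 1 <;> by_cases h2 : v = 2 <;> by_cases h3 : v = 3 <;>
      simp [ih, pvValid, pvG, h0, h1, h2, h3]

-- transposing a nonempty family of equally-shaped mapped columns
theorem pvZipT_maps (fv : List Int) (rng : List Int) :
    pvZipT rng.length (fv.map (fun v => rng.map (fun i => pvG v i)))
      = rng.map (fun i => fv.map (fun v => pvG v i)) := by
  induction rng with
  | nil => simp [pvZipT]
  | cons i is ih =>
    simp only [List.length_cons, pvZipT, List.map_cons,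
      List.map_map, Function.comp_def, List.tail_cons, List.headI]
    rw [ih]
    simp

theorem palrange_eq (vals : List Int) (step : Int) :
    palrange vals step = palrange_alt vals step := by
  unfold palrange palrange_alt
  dsimp only
  rw [pvA_outer, pvB_cols]
  simp only [List.nil_append]
  set rng := PySem.List.pyRange 0 32 step
  by_cases h : vals.filter pvValid = []
  · simp [h]
  · simp only [List.map_eq_nil_iff, h, if_false]
    exact (pvZipT_maps _ rng).symm

-- ===== VERDICT (by name: the statement is the Claim_ definition above) =====
theorem palrange_spec : Claim_equal_palrange := by
  intro vals step _ _
  exact palrange_eq vals step
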